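-- pv_equiv track=rewrite | github.com/judasgutenberg/Esp8266_RemoteControl | meshtastic_bridge/meshtastic_bridge.py | countSetBitsInString
-- ===== SOURCE A (Python) =====
-- def countSetBitsInString(s: str) -> int:
--     bit_count = 0
--     for c in s:
--         v = ord(c)
--         while v:
--             bit_count += v & 1
--             v >>= 1
--     return bit_count % 256
-- ===== SOURCE B (Python) =====
-- _POPCOUNT = [0]
-- for _ in range(8):
--     _POPCOUNT = _POPCOUNT + [x + 1 for x in _POPCOUNT]
--
--
-- def countSetBitsInString(s: str) -> int:
--     return sum(_POPCOUNT[ord(c)] for c in s) % 256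
-- ===== Notes on version B (the rewrite author's own statement) =====
-- stated objective: faster
-- what changed: Replaces the inner bit-by-bit shift-and-test while loop with a 256-entry popcount table built once by binary doubling ([0] doubled 8 times with +1), so each character costs one list lookup instead of a per-bit loop.
import Mathlib
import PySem

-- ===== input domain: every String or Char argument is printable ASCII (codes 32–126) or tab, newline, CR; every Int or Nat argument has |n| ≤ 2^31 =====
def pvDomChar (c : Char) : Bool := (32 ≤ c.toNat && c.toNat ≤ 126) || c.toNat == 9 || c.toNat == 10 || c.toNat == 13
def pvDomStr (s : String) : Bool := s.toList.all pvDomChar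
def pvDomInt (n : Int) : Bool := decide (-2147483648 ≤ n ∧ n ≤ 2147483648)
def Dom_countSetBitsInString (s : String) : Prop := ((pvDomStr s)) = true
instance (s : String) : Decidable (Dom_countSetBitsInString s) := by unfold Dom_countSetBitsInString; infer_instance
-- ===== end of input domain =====

-- B replaces A's per-character shift-and-test bit loop by a 256-entry popcount table
-- built once by binary doubling, then a single lookup per character (alternative algorithm).

-- ===== PORT A =====
-- inner 'while v: bit_count += v & 1; v >>= 1' (v = ord(c) is a Nat; & 1 = % 2, >> 1 = / 2)
def pvLoopA (v : Nat) (acc : Int) : Int :=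
  if v = 0 then acc else pvLoopA (v / 2) (acc + ((v % 2 : Nat) : Int))
termination_by v
decreasing_by exact Nat.div_lt_self (Nat.pos_of_ne_zero (by assumption)) (by norm_num)

def countSetBitsInString (s : String) : Int :=
  PySem.Int.mod (s.toList.foldl (fun acc c => pvLoopA c.toNat acc) 0) 256

-- ===== PORT B =====
-- table = [0]; doubled 8 times: table + [x+1 for x in table]
def pvPopTable : List Int :=
  (List.range 8).foldl (fun t _ => t ++ t.map (· + 1)) [0]

def countSetBitsInString_alt (s : String) : Int :=
  PySem.Int.mod (s.toList.foldl (fun acc c => acc + pvPopTable.getD c.toNat 0) 0) 256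

-- ===== PRECONDITION & SPEC =====
def Spec_countSetBitsInString (s : String) (out : Int) : Prop := out = countSetBitsInString_alt s
instance (s : String) (out : Int) : Decidable (Spec_countSetBitsInString s out) := by unfold Spec_countSetBitsInString; infer_instance

-- ===== CLAIM (what is proved, stated in full; the proofs are below) =====
def Claim_equal_countSetBitsInString : Prop := ∀ (s : String), Dom_countSetBitsInString s → Spec_countSetBitsInString s (countSetBitsInString s)

-- ===== LEMMAS AND PROOFS =====

def pvBits (v : Nat) : Int := pvLoopA v 0

lemma pvLoopA_acc (v : Nat) : ∀ acc : Int, pvLoopA v acc = acc + pvBits v := by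
  induction v using Nat.strong_induction_on with
  | _ v ih =>
    intro acc
    by_cases h : v = 0
    · subst h; simp [pvLoopA, pvBits]
    · have hlt : v / 2 < v := Nat.div_lt_self (Nat.pos_of_ne_zero h) (by norm_num)
      rw [pvLoopA, if_neg h, ih _ hlt]
      conv_rhs => rw [pvBits, pvLoopA, if_neg h, ih _ hlt]
      ring

lemma pvBits_zero : pvBits 0 = 0 := by simp [pvBits, pvLoopA]

lemma pvBits_step (v : Nat) (h : v ≠ 0) : pvBits v = pvBits (v / 2) + ((v % 2 : Nat) : Int) := by
  rw [pvBits, pvLoopA, if_neg h, pvLoopA_acc]; ring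

lemma pvBits_add_pow : ∀ k n : Nat, n < 2 ^ k → pvBits (2 ^ k + n) = pvBits n + 1 := by
  intro k
  induction k with
  | zero =>
    intro n hn
    interval_cases n
    simp [pvBits, pvLoopA]
  | succ k ih =>
    intro n hn
    have hne : 2 ^ (k + 1) + n ≠ 0 := by positivity
    have hdiv : (2 ^ (k + 1) + n) / 2 = 2 ^ k + n / 2 := by omega
    have hmod : (2 ^ (k + 1) + n) % 2 = n % 2 := by omega
    rw [pvBits_step _ hne, hdiv, hmod, ih (n / 2) (by omega)]
    by_cases h0 : n = 0
    · subst h0; simp [pvBits_zero]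
    · rw [pvBits_step n h0]; ring

def pvStep : List Int → Nat → List Int := fun t _ => t ++ t.map (· + 1)

lemma pvTable_aux : ∀ k : Nat,
    ((List.range k).foldl pvStep [0]).length = 2 ^ k ∧
    ∀ n : Nat, n < 2 ^ k → ((List.range k).foldl pvStep [0]).getD n 0 = pvBits n := by
  intro k
  induction k with
  | zero =>
    refine ⟨by simp, ?_⟩
    intro n hn; interval_cases n; simp [pvBits_zero]
  | succ k ih =>
    obtain ⟨hlen, hget⟩ := ih
    rw [List.range_succ, List.foldl_append]
    set t := (List.range k).foldl pvStep [0] with ht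
    have hstep : List.foldl pvStep t [k] = t ++ t.map (· + 1) := by
      simp [List.foldl, pvStep]
    rw [hstep]
    refine ⟨by simp [hlen]; ring, ?_⟩
    intro n hn
    by_cases h : n < 2 ^ k
    · rw [List.getD_eq_getElem?_getD, List.getElem?_append_left (by omega), ← List.getD_eq_getElem?_getD]
      exact hget n h
    · rw [List.getD_eq_getElem?_getD, List.getElem?_append_right (by omega), hlen]
      have hlt : n - 2 ^ k < t.length := by omega
      rw [List.getElem?_map, List.getElem?_eq_getElem hlt]
      simp only [Option.map_some, Option.getD_some]
      have h1 := hget (n - 2 ^ k) (by omega)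
      rw [List.getD_eq_getElem?_getD, List.getElem?_eq_getElem hlt, Option.getD_some] at h1
      rw [h1]
      have h2 : pvBits n = pvBits (n - 2 ^ k) + 1 := by
        have h3 := pvBits_add_pow k (n - 2 ^ k) (by omega)
        rwa [show 2 ^ k + (n - 2 ^ k) = n by omega] at h3
      omega

lemma pvTable_get (n : Nat) (hn : n < 256) : pvPopTable.getD n 0 = pvBits n :=
  (pvTable_aux 8).2 n (by norm_num [hn])

lemma pvFold_eq (l : List Char) (h : ∀ c ∈ l, pvDomChar c = true) : ∀ acc : Int,
    l.foldl (fun acc c => pvLoopA c.toNat acc) acc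
      = l.foldl (fun acc c => acc + pvPopTable.getD c.toNat 0) acc := by
  induction l with
  | nil => intro acc; rfl
  | cons c l ih =>
    intro acc
    have hc : c.toNat < 256 := by
      have := h c (List.mem_cons_self ..)
      simp [pvDomChar] at this
      omega
    simp only [List.foldl_cons]
    rw [pvLoopA_acc, pvTable_get c.toNat hc]
    exact ih (fun c hc => h c (List.mem_cons_of_mem _ hc)) _

-- ===== VERDICT (by name: the statement is the Claim_ definition above) =====
theorem countSetBitsInString_spec : Claim_equal_countSetBitsInString := by
  intro s hdom
  unfold Spec_countSetBitsInString countSetBitsInString countSetBitsInString_alt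
  rw [pvFold_eq]
  intro c hc
  have := hdom
  unfold Dom_countSetBitsInString pvDomStr at this
  rw [List.all_eq_true] at this
  exact this c hc
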